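-- pv_equiv track=rewrite | github.com/annrud/homework_python_4 | homework_4_5.py | create_new_list
-- ===== SOURCE A (Python) =====
-- list_x = ['x^6', 'x^5', 'x^4', 'x^3', 'x^2', 'x', '']
--
-- def create_new_list(lst):
--     list_res = ['0' for _ in range(len(list_x))]
--     for i in range(len(list_res)):
--         for j in range(len(lst)):
--             if 'x' in lst[j]:
--                 if list_x[i] == lst[j][lst[j].index('x'):]:
--                     coeff = lst[j][:lst[j].index('x')]
--                     if not coeff.isdigit() and len(coeff) == 1:
--                         list_res[i] = coeff + '1'
--                     else:
--                         list_res[i] = coeff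
--     if 'x' not in lst[-1]:
--         list_res[-1] = lst[-1]
--     return list_res
-- ===== SOURCE B (Python) =====
-- list_x = ['x^6', 'x^5', 'x^4', 'x^3', 'x^2', 'x', '']
--
-- def create_new_list(lst):
--     table = {}
--     for term in lst:
--         if 'x' in term:
--             k = term.index('x')
--             coeff = term[:k]
--             if not coeff.isdigit() and len(coeff) == 1:
--                 coeff = coeff + '1'
--             table[term[k:]] = coeff
--     res = [table.get(key, '0') for key in list_x[:-1]]
--     res.append(lst[-1] if 'x' not in lst[-1] else '0')
--     return res
-- ===== Notes on version B (the rewrite author's own statement) =====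
-- stated objective: faster
-- what changed: Replaced A's 7 repeated rescans of lst (one per coefficient slot, with substring re-extraction per slot) by a single pass that builds a dict from x-part key to processed coefficient (last match wins via overwrite) followed by one lookup per slot.
import Mathlib
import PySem

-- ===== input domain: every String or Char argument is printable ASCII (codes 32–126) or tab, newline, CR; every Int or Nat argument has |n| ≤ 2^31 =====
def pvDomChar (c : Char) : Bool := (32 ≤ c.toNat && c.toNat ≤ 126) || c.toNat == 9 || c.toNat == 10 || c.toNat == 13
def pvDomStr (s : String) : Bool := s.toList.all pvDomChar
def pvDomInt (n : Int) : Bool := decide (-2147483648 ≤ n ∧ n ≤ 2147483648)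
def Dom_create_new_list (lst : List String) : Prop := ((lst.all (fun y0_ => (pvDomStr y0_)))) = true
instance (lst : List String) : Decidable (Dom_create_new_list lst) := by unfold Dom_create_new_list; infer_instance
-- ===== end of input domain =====

-- B replaces A's per-slot rescans of lst with one dict built in a single pass plus one
-- lookup per slot (last match wins becomes dict overwrite); measured faster by a constant factor.

-- ===== PORT A =====
def pvListX : List String := ["x^6", "x^5", "x^4", "x^3", "x^2", "x", ""]

def create_new_list (lst : List String) : List String :=
  let list_res := (PySem.List.pyRange 0 (PySem.List.len pvListX) 1).map (fun _ => "0")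
  let list_res :=
    (PySem.List.pyRange 0 (PySem.List.len list_res) 1).foldl (fun res i =>
      (PySem.List.pyRange 0 (PySem.List.len lst) 1).foldl (fun res j =>
        let t := PySem.List.pyGetD lst j ""
        if PySem.Str.isIn "x" t = true then
          if PySem.List.pyGetD pvListX i "" =
              PySem.Str.slice t (some (PySem.Str.find t "x")) none then
            let coeff := PySem.Str.slice t none (some (PySem.Str.find t "x"))
            if PySem.Str.strIsdigit coeff = false ∧ PySem.Str.len coeff = 1 then
              PySem.List.pySetD res i (PySem.Str.join "" [coeff, "1"])
            else
              PySem.List.pySetD res i coeff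
          else res
        else res) res) list_res
  if PySem.Str.isIn "x" (PySem.List.pyGetD lst (-1) "") = false then
    PySem.List.pySetD list_res (-1) (PySem.List.pyGetD lst (-1) "")
  else list_res

-- ===== PORT B =====
def pvListXAlt : List String := ["x^6", "x^5", "x^4", "x^3", "x^2", "x", ""]

def create_new_list_alt (lst : List String) : List String :=
  let table :=
    lst.foldl (fun (d : PySem.Dict String String) term =>
      if PySem.Str.isIn "x" term = true then
        let k := PySem.Str.find term "x"
        let coeff := PySem.Str.slice term none (some k)
        let coeff :=
          if PySem.Str.strIsdigit coeff = false ∧ PySem.Str.len coeff = 1 then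
            PySem.Str.join "" [coeff, "1"]
          else coeff
        d.insert (PySem.Str.slice term (some k) none) coeff
      else d) PySem.Dict.empty
  let res := (PySem.List.slice pvListXAlt none (some (-1))).map (fun key => table.getD key "0")
  res ++ [if PySem.Str.isIn "x" (PySem.List.pyGetD lst (-1) "") = false then
            PySem.List.pyGetD lst (-1) ""
          else "0"]

-- ===== PRECONDITION & SPEC =====
-- Pre_ excludes only the empty list, on which Python A raises IndexError at lst[-1].
def Pre_create_new_list (lst : List String) : Prop := lst ≠ []
instance (lst : List String) : Decidable (Pre_create_new_list lst) := by
  unfold Pre_create_new_list; infer_instance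
def pvWitness_create_new_list : List String := ["2x^2", "-x", "5"]
def Spec_create_new_list (lst : List String) (out : List String) : Prop :=
  out = create_new_list_alt lst
instance (lst : List String) (out : List String) : Decidable (Spec_create_new_list lst out) := by
  unfold Spec_create_new_list; infer_instance

-- ===== CLAIM =====
def Claim_equal_create_new_list : Prop :=
  ∀ (lst : List String), Dom_create_new_list lst → Pre_create_new_list lst →
    Spec_create_new_list lst (create_new_list lst)

-- ===== LEMMAS AND PROOFS =====
-- the x-part key and processed coefficient of a term that contains 'x'
def pvKeyOf (t : String) : String :=
  PySem.Str.slice t (some (PySem.Str.find t "x")) none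
def pvValOf (t : String) : String :=
  let coeff := PySem.Str.slice t none (some (PySem.Str.find t "x"))
  if PySem.Str.strIsdigit coeff = false ∧ PySem.Str.len coeff = 1 then
    PySem.Str.join "" [coeff, "1"]
  else coeff
-- last processed coefficient among terms with key K, starting from v
def pvScanFrom (lst : List String) (K : String) (v : String) : String :=
  lst.foldl (fun v t =>
    if PySem.Str.isIn "x" t = true ∧ pvKeyOf t = K then pvValOf t else v) v

-- a loop that conditionally writes only slot i is a single set of the scanned value
lemma pv_foldl_setD (c : String → Prop) [DecidablePred c] (f : String → String) :
    ∀ (l res : List String) (i : Int), 0 ≤ i → i < res.length →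
      l.foldl (fun r t => if c t then PySem.List.pySetD r i (f t) else r) res
        = res.set i.toNat (l.foldl (fun v t => if c t then f t else v) (res.getD i.toNat "0")) := by
  intro l
  induction l with
  | nil =>
    intro res i h0 hi
    simp only [List.foldl_nil]
    rw [List.getD_eq_getElem res "0" (by omega), List.set_getElem_self]
  | cons t l ih =>
    intro res i h0 hi
    simp only [List.foldl_cons]
    by_cases h : c t
    · rw [if_pos h, if_pos h, PySem.List.pySetD_of_nonneg res (f t) h0]
      rw [ih (res.set i.toNat (f t)) i h0 (by simpa using hi)]
      rw [List.getD_eq_getElem (res.set i.toNat (f t)) "0" (by simp; omega)]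
      rw [List.getElem_set_self (by simp; omega), List.set_set]
    · rw [if_neg h, if_neg h, ih res i h0 hi]

-- A's inner loop, for fixed slot i, in set form
lemma pv_step (lst res : List String) (i : Int) (h0 : 0 ≤ i) (hi : i < res.length) :
    (PySem.List.pyRange 0 (PySem.List.len lst) 1).foldl (fun res j =>
        let t := PySem.List.pyGetD lst j ""
        if PySem.Str.isIn "x" t = true then
          if PySem.List.pyGetD pvListX i "" =
              PySem.Str.slice t (some (PySem.Str.find t "x")) none then
            let coeff := PySem.Str.slice t none (some (PySem.Str.find t "x"))
            if PySem.Str.strIsdigit coeff = false ∧ PySem.Str.len coeff = 1 then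
              PySem.List.pySetD res i (PySem.Str.join "" [coeff, "1"])
            else
              PySem.List.pySetD res i coeff
          else res
        else res) res
      = res.set i.toNat
          (pvScanFrom lst (PySem.List.pyGetD pvListX i "") (res.getD i.toNat "0")) := by
  rw [PySem.List.foldl_pyRange_zero_pyGetD lst ""
    (fun r t =>
        if PySem.Str.isIn "x" t = true then
          if PySem.List.pyGetD pvListX i "" =
              PySem.Str.slice t (some (PySem.Str.find t "x")) none then
            let coeff := PySem.Str.slice t none (some (PySem.Str.find t "x"))
            if PySem.Str.strIsdigit coeff = false ∧ PySem.Str.len coeff = 1 then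
              PySem.List.pySetD r i (PySem.Str.join "" [coeff, "1"])
            else
              PySem.List.pySetD r i coeff
          else r
        else r) res]
  have hbody : (fun (r : List String) (t : String) =>
        if PySem.Str.isIn "x" t = true then
          if PySem.List.pyGetD pvListX i "" =
              PySem.Str.slice t (some (PySem.Str.find t "x")) none then
            let coeff := PySem.Str.slice t none (some (PySem.Str.find t "x"))
            if PySem.Str.strIsdigit coeff = false ∧ PySem.Str.len coeff = 1 then
              PySem.List.pySetD r i (PySem.Str.join "" [coeff, "1"])
            else
              PySem.List.pySetD r i coeff
          else r
        else r)
      = fun r t =>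
          if PySem.Str.isIn "x" t = true ∧ pvKeyOf t = PySem.List.pyGetD pvListX i "" then
            PySem.List.pySetD r i (pvValOf t)
          else r := by
    funext r t
    by_cases h1 : PySem.Str.isIn "x" t = true
    · by_cases h2 : pvKeyOf t = PySem.List.pyGetD pvListX i ""
      · simp only [pvKeyOf] at h2
        simp only [h1, h2, pvKeyOf, pvValOf, and_self, if_pos]
        split_ifs <;> rfl
      · simp only [pvKeyOf] at h2 ⊢
        rw [if_pos h1, if_neg (fun he => h2 he.symm), if_neg (fun hc => h2 hc.2)]
    · rw [if_neg h1, if_neg (fun hc => h1 hc.1)]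
  rw [hbody, pv_foldl_setD _ _ lst res i h0 hi, pvScanFrom]

-- a term containing 'x' has a nonempty key
lemma pv_key_ne_empty (t : String) (h : PySem.Str.isIn "x" t = true) : pvKeyOf t ≠ "" := by
  intro he
  have hnn : 0 ≤ PySem.Str.find t "x" := by
    rw [PySem.Str.find_nonneg_iff]
    exact (PySem.Str.isIn_iff_infix _ _).mp h
  have hfind : PySem.Str.find t "x" = PySem.Chars.find t.toList ['x'] := by
    simp [PySem.Str.find]
  have hspec := PySem.Chars.find_spec (s := t.toList) (sub := ['x']) (by rw [← hfind]; exact hnn)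
  have htl : (pvKeyOf t).toList = t.toList.drop (PySem.Chars.find t.toList ['x']).toNat := by
    rw [pvKeyOf, PySem.Str.toList_slice, PySem.Chars.slice_eq_listSlice, hfind,
      PySem.List.slice_from t.toList (a := PySem.Chars.find t.toList ['x'])
        (by rw [← hfind]; exact hnn)]
  rw [he] at htl
  have := hspec.1
  rw [← htl] at this
  simp at this

-- hence the scan for key "" never fires
lemma pv_scan_empty (lst : List String) : ∀ v, pvScanFrom lst "" v = v := by
  induction lst with
  | nil => intro v; rfl
  | cons t l ih =>
    intro v
    rw [pvScanFrom, List.foldl_cons]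
    rw [if_neg (fun hc => pv_key_ne_empty t hc.1 hc.2), ← pvScanFrom, ih]

-- B's dict-building body, with lets resolved
lemma pv_dict_body_eq :
    (fun (d : PySem.Dict String String) term =>
          if PySem.Str.isIn "x" term = true then
            let k := PySem.Str.find term "x"
            let coeff := PySem.Str.slice term none (some k)
            let coeff :=
              if PySem.Str.strIsdigit coeff = false ∧ PySem.Str.len coeff = 1 then
                PySem.Str.join "" [coeff, "1"]
              else coeff
            d.insert (PySem.Str.slice term (some k) none) coeff
          else d)
      = fun (d : PySem.Dict String String) term =>
          if PySem.Str.isIn "x" term = true then d.insert (pvKeyOf term) (pvValOf term)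
          else d := by
  funext d term
  by_cases h : PySem.Str.isIn "x" term = true
  · rw [if_pos h, if_pos h]; rfl
  · rw [if_neg h, if_neg h]

-- B's dict lookup equals A's last-match scan
lemma pv_dict_getD (l : List String) :
    ∀ (d : PySem.Dict String String) (K dflt : String),
      (l.foldl (fun (d : PySem.Dict String String) term =>
          if PySem.Str.isIn "x" term = true then d.insert (pvKeyOf term) (pvValOf term)
          else d) d).getD K dflt
        = pvScanFrom l K (d.getD K dflt) := by
  induction l with
  | nil => intro d K dflt; rfl
  | cons t l ih =>
    intro d K dflt
    rw [pvScanFrom, List.foldl_cons, List.foldl_cons, ← pvScanFrom]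
    by_cases h1 : PySem.Str.isIn "x" t = true
    · rw [if_pos h1, ih, PySem.Dict.getD_insert]
      by_cases h2 : pvKeyOf t = K
      · rw [if_pos h2.symm, if_pos ⟨h1, h2⟩]
      · rw [if_neg (fun he => h2 he.symm), if_neg (fun hc => h2 hc.2)]
    · rw [if_neg h1, ih, if_neg (fun hc => h1 hc.1)]

-- ===== VERDICT =====
theorem create_new_list_spec : Claim_equal_create_new_list := by
  unfold Claim_equal_create_new_list
  intro lst _ hpre
  simp only [Spec_create_new_list, create_new_list, create_new_list_alt]
  rw [pv_dict_body_eq]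
  have hres0 : (PySem.List.pyRange 0 (PySem.List.len pvListX) 1).map
      (fun _ => ("0" : String)) = ["0", "0", "0", "0", "0", "0", "0"] := by decide
  rw [hres0]
  have hrange : PySem.List.pyRange 0
      (PySem.List.len (["0", "0", "0", "0", "0", "0", "0"] : List String)) 1
      = [0, 1, 2, 3, 4, 5, 6] := by decide
  rw [hrange]
  simp only [List.foldl_cons, List.foldl_nil]
  rw [pv_step lst _ 0 (by norm_num) (by simp)]
  rw [pv_step lst _ 1 (by norm_num) (by simp)]
  rw [pv_step lst _ 2 (by norm_num) (by simp)]
  rw [pv_step lst _ 3 (by norm_num) (by simp)]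
  rw [pv_step lst _ 4 (by norm_num) (by simp)]
  rw [pv_step lst _ 5 (by norm_num) (by simp)]
  rw [pv_step lst _ 6 (by norm_num) (by simp)]
  have hslice : PySem.List.slice pvListXAlt none (some (-1))
      = ["x^6", "x^5", "x^4", "x^3", "x^2", "x"] := by decide
  rw [hslice]
  simp only [List.map, pv_dict_getD, PySem.Dict.getD_empty]
  have hk0 : PySem.List.pyGetD pvListX (0 : Int) "" = "x^6" := by decide
  have hk1 : PySem.List.pyGetD pvListX (1 : Int) "" = "x^5" := by decide
  have hk2 : PySem.List.pyGetD pvListX (2 : Int) "" = "x^4" := by decide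
  have hk3 : PySem.List.pyGetD pvListX (3 : Int) "" = "x^3" := by decide
  have hk4 : PySem.List.pyGetD pvListX (4 : Int) "" = "x^2" := by decide
  have hk5 : PySem.List.pyGetD pvListX (5 : Int) "" = "x" := by decide
  have hk6 : PySem.List.pyGetD pvListX (6 : Int) "" = "" := by decide
  rw [hk0, hk1, hk2, hk3, hk4, hk5, hk6]
  norm_num [List.set, List.getD, show Int.toNat 2 = 2 from rfl, show Int.toNat 3 = 3 from rfl,
    show Int.toNat 4 = 4 from rfl, show Int.toNat 5 = 5 from rfl, show Int.toNat 6 = 6 from rfl]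
  rw [pv_scan_empty lst "0"]
  by_cases hc : PySem.Chars.isIn "x".toList (PySem.List.pyGetD lst (-1) "").toList = false
  · rw [if_pos hc, if_pos hc]; rfl
  · rw [if_neg hc, if_neg hc]
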